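-- pv_equiv track=rewrite | github.com/averwhy/Marvin-Discord-Bot | Marvin-main.py | _extract_scp_number
-- ===== SOURCE A (Python) =====
-- def _extract_scp_number(word_list):
--     captured_scp_number = None
--     for index, word in enumerate(word_list):
--         if word == "SCP":
--                 # We're gonna return the word after the current word (index+1)
--                 # But we have to make sure that the next word exists in the list
--                 # otherwise we will get IndexError exception
--             if index + 1 < len(word_list):
--                 captured_scp_number = word_list[index + 1]
--             else:
--                 return None
--         # If we captured a string in the for loop we have to make sure that that
--         # string is actually a number and not some random word example "SCP blabla"
--     if captured_scp_number.isdigit():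
--         return captured_scp_number
--     return None
-- ===== SOURCE B (Python) =====
-- def _extract_scp_number(word_list):
--     # Scan right-to-left, carrying the word seen just before (= the successor in
--     # original order): the first "SCP" met from the right decides immediately.
--     prev = None
--     for w in reversed(word_list):
--         if w == "SCP":
--             return prev if prev is not None and prev.isdigit() else None
--         prev = w
--     return None
-- ===== Notes on version B (the rewrite author's own statement) =====
-- stated objective: alternative
-- what changed: B replaces A's forward loop that keeps overwriting a captured successor and validates it in a post-loop isdigit check by a single right-to-left scan carrying the previously seen word: the first 'SCP' met from the right decides and returns immediately, with no capture state surviving the loop and no index arithmetic.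
-- crash fix: On lists containing no 'SCP' token, A raises AttributeError (None.isdigit()); B returns None. — e.g. on _extract_scp_number(["hello"]): A raises AttributeError, B returns none
import Mathlib
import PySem

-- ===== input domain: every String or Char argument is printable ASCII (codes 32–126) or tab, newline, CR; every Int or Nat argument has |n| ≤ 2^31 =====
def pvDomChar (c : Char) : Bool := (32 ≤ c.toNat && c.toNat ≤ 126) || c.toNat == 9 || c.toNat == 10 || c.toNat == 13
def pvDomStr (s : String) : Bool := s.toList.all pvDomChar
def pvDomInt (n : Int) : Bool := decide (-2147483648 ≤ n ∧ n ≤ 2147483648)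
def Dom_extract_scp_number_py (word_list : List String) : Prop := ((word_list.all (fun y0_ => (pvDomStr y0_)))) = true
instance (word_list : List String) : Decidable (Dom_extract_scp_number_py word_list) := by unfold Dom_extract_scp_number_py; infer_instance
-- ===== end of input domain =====

-- B replaces A's forward loop with mutable capture state and post-loop isdigit check
-- by a single right-to-left scan that decides and returns at the first "SCP" met from
-- the right. Alternative decomposition, same cost.

-- ===== PORT A =====
-- the final 'if captured_scp_number.isdigit(): …' of A; on none Python raises
-- AttributeError (excluded by Pre_), the port returns none there.
def pvFinishA (captured : Option String) : Option String :=
  match captured with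
  | some s => if PySem.Str.strIsdigit s then some s else none
  | none => none

-- A's for-loop over enumerate(word_list); 'return None' inside the loop is the early
-- 'none' in the then-branch.
def pvGoA (word_list : List String) : List (Int × String) → Option String → Option String
  | [], captured => pvFinishA captured
  | (index, word) :: rest, captured =>
    if word = "SCP" then
      if index + 1 < (word_list.length : Int) then
        pvGoA word_list rest (PySem.List.pyGet? word_list (index + 1))
      else none
    else pvGoA word_list rest captured

def extract_scp_number_py (word_list : List String) : Option String :=
  pvGoA word_list (PySem.List.enumerate word_list) none

-- ===== PORT B =====
-- Source B's 'for w in reversed(word_list)' loop carrying prev; the early 'return'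
-- inside the loop is the non-recursive branch.
def pvFromRight : List String → Option String → Option String
  | [], _ => none
  | w :: rest, prev =>
    if w = "SCP" then
      match prev with
      | some p => if PySem.Str.strIsdigit p then some p else none
      | none => none
    else pvFromRight rest (some w)

def extract_scp_number_py_alt (word_list : List String) : Option String :=
  -- reversed(word_list) is word_list.reverse
  pvFromRight word_list.reverse none

-- ===== PRECONDITION & SPEC =====
-- Pre_: exactly the inputs on which Python A returns: if the list contains no "SCP",
-- A reaches None.isdigit() and raises AttributeError.
def Pre_extract_scp_number_py (word_list : List String) : Prop := "SCP" ∈ word_list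
instance (word_list : List String) : Decidable (Pre_extract_scp_number_py word_list) := by unfold Pre_extract_scp_number_py; infer_instance

def pvWitness_extract_scp_number_py : List String := ["SCP", "173"]

-- On lists containing no "SCP" token, A raises AttributeError (None.isdigit()); B returns None.
def Raises_extract_scp_number_py (word_list : List String) : Prop := "SCP" ∉ word_list
instance (word_list : List String) : Decidable (Raises_extract_scp_number_py word_list) := by unfold Raises_extract_scp_number_py; infer_instance

def pvRaiseWitness_extract_scp_number_py : List String := ["hello"]
def pvRaiseWitnessOut_extract_scp_number_py : Option String := none

def Spec_extract_scp_number_py (word_list : List String) (out : Option String) : Prop := out = extract_scp_number_py_alt word_list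
instance (word_list : List String) (out : Option String) : Decidable (Spec_extract_scp_number_py word_list out) := by unfold Spec_extract_scp_number_py; infer_instance

-- ===== CLAIM (what is proved, stated in full; the proofs are below) =====
def Claim_equal_extract_scp_number_py : Prop := ∀ (word_list : List String), Dom_extract_scp_number_py word_list → Pre_extract_scp_number_py word_list → Spec_extract_scp_number_py word_list (extract_scp_number_py word_list)

def Claim_raises_extract_scp_number_py : Prop := (∀ (word_list : List String), Dom_extract_scp_number_py word_list → Raises_extract_scp_number_py word_list → ¬ Pre_extract_scp_number_py word_list) ∧ (Dom_extract_scp_number_py (pvRaiseWitness_extract_scp_number_py) ∧ Raises_extract_scp_number_py (pvRaiseWitness_extract_scp_number_py) ∧ extract_scp_number_py_alt (pvRaiseWitness_extract_scp_number_py) = pvRaiseWitnessOut_extract_scp_number_py)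

-- ===== LEMMAS AND PROOFS =====

-- last-occurrence decomposition supplied by Pre_
lemma pvLastSplit (l : List String) (h : "SCP" ∈ l) :
    ∃ u v, l = u ++ "SCP" :: v ∧ "SCP" ∉ v := by
  induction l with
  | nil => simp at h
  | cons a l ih =>
    by_cases hm : "SCP" ∈ l
    · obtain ⟨u, v, rfl, hv⟩ := ih hm
      exact ⟨a :: u, v, rfl, hv⟩
    · have ha : a = "SCP" := by
        rcases List.mem_cons.mp h with h' | h'
        · exact h'.symm
        · exact absurd h' hm
      exact ⟨[], l, by simp [ha], hm⟩

-- B's recursion across a prefix free of "SCP": prev ends up the last word of the prefix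
lemma pvFromRight_append (pre rest : List String) (prev : Option String)
    (h : "SCP" ∉ pre) :
    pvFromRight (pre ++ "SCP" :: rest) prev = pvFinishA (pre.getLast?.or prev) := by
  induction pre generalizing prev with
  | nil => simp [pvFromRight, pvFinishA]
  | cons a pre ih =>
    have ha : ¬ a = "SCP" := fun e => h (by simp [e])
    have h' : "SCP" ∉ pre := fun e => h (by simp [e])
    rw [List.cons_append]
    show pvFromRight (a :: (pre ++ "SCP" :: rest)) prev = _
    rw [show pvFromRight (a :: (pre ++ "SCP" :: rest)) prev
        = pvFromRight (pre ++ "SCP" :: rest) (some a) by simp [pvFromRight, ha]]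
    rw [ih (some a) h']
    congr 1
    rcases List.eq_nil_or_concat pre with rfl | ⟨ys, y, rfl⟩
    · simp
    · have hgl : (a :: (ys ++ [y])).getLast? = some y := by
        rw [← List.cons_append]; exact List.getLast?_concat
      simp [hgl]

-- filterMap over enumerate of an "SCP"-free list is empty
lemma pvFilterMap_none (v : List String) (s : Int) (h : "SCP" ∉ v) :
    (PySem.List.enumerate v s).filterMap
      (fun p => if p.2 = "SCP" then some p.1 else none) = [] := by
  rw [List.filterMap_eq_nil_iff]
  intro p hp
  obtain ⟨k, hk, rfl⟩ := (PySem.List.mem_enumerate_iff _ _ _).mp hp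
  have : v[k] ≠ "SCP" := fun e => h (e ▸ List.getElem_mem hk)
  simp [this]

-- Characterisation of A's loop on any suffix of enumerate(word_list): its value is
-- determined by the LAST "SCP" position in the suffix (or by the carried capture).
lemma pvGoA_eq (wl : List String) (l : List (Int × String)) (captured : Option String)
    (hsuf : ∃ pre, pre ++ l = PySem.List.enumerate wl) :
    pvGoA wl l captured =
      match (l.filterMap (fun p => if p.2 = "SCP" then some p.1 else none)).getLast? with
      | none => pvFinishA captured
      | some last =>
          if last + 1 < (wl.length : Int) then pvFinishA (PySem.List.pyGet? wl (last + 1))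
          else none := by
  induction l generalizing captured with
  | nil => simp [pvGoA]
  | cons hd tl ih =>
    obtain ⟨pre, hpre⟩ := hsuf
    obtain ⟨index, word⟩ := hd
    have hsuf' : ∃ pre', pre' ++ tl = PySem.List.enumerate wl :=
      ⟨pre ++ [(index, word)], by simpa using hpre⟩
    have hidx : index = (pre.length : Int) := by
      have h1 : (pre ++ (index, word) :: tl)[pre.length]? = some (index, word) := by
        simp
      rw [hpre] at h1
      rw [PySem.List.getElem?_enumerate] at h1
      rcases h : wl[pre.length]? with _ | w
      · rw [h] at h1; simp at h1
      · rw [h] at h1; simp at h1; omega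
    have hlen : pre.length + (tl.length + 1) = wl.length := by
      have := congrArg List.length hpre
      simpa [PySem.List.length_enumerate, Nat.add_comm, Nat.add_assoc] using this
    by_cases hw : word = "SCP"
    · by_cases hin : index + 1 < (wl.length : Int)
      · have hstep : pvGoA wl ((index, word) :: tl) captured
            = pvGoA wl tl (PySem.List.pyGet? wl (index + 1)) := by
          simp [pvGoA, hw, hin]
        rw [hstep, ih _ hsuf']
        rcases hlast : (tl.filterMap (fun p => if p.2 = "SCP" then some p.1 else none)).getLast? with _ | last
        · have : ((((index, word) :: tl).filterMap
              (fun p => if p.2 = "SCP" then some p.1 else none)).getLast?) = some index := by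
            simp [hw, List.getLast?_cons, List.getLast?_eq_none_iff.mp hlast]
          rw [hlast, this]
          simp [hin]
        · have hne : (tl.filterMap (fun p => if p.2 = "SCP" then some p.1 else none)) ≠ [] := by
            intro h; rw [h] at hlast; simp at hlast
          have : ((((index, word) :: tl).filterMap
              (fun p => if p.2 = "SCP" then some p.1 else none)).getLast?) = some last := by
            rcases hl : (tl.filterMap (fun p => if p.2 = "SCP" then some p.1 else none)) with _ | ⟨x, xs⟩
            · exact absurd hl hne
            · rw [hl] at hlast
              simp [hw, hl, List.getLast?_cons_cons, ← hlast]
          rw [hlast, this]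
      · have htl : tl = [] := by
          have : index = (pre.length : Int) := hidx
          have : ¬ ((pre.length : Int) + 1 < (wl.length : Int)) := by rw [← this]; exact hin
          have : wl.length ≤ pre.length + 1 := by exact_mod_cast by omega
          have : tl.length = 0 := by omega
          exact List.length_eq_zero_iff.mp this
        subst htl
        simp [pvGoA, hw, hin]
    · simp [pvGoA, hw, ih _ hsuf']

-- ===== VERDICT (by name: the statement is the Claim_ definition above) =====
theorem extract_scp_number_py_spec : Claim_equal_extract_scp_number_py := by
  intro wl _ hpre
  unfold Spec_extract_scp_number_py extract_scp_number_py extract_scp_number_py_alt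
  obtain ⟨u, v, rfl, hv⟩ := pvLastSplit wl hpre
  -- B side
  have hrev : (u ++ "SCP" :: v).reverse = v.reverse ++ "SCP" :: u.reverse := by
    simp
  rw [hrev, pvFromRight_append _ _ _ (by simpa using hv), Option.or_none,
    List.getLast?_reverse]
  -- A side
  rw [pvGoA_eq _ _ none ⟨[], rfl⟩]
  have henum : PySem.List.enumerate (u ++ "SCP" :: v)
      = PySem.List.enumerate u ++ ((u.length : Int), "SCP")
        :: PySem.List.enumerate v ((u.length : Int) + 1) := by
    rw [PySem.List.enumerate_append, PySem.List.enumerate_cons]; norm_num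
  have hfm : (PySem.List.enumerate (u ++ "SCP" :: v)).filterMap
        (fun p => if p.2 = "SCP" then some p.1 else none)
      = (PySem.List.enumerate u).filterMap
          (fun p => if p.2 = "SCP" then some p.1 else none) ++ [((u.length : Int))] := by
    rw [henum, List.filterMap_append, List.filterMap_cons, pvFilterMap_none v _ hv]
    simp
  rw [hfm, List.getLast?_concat]
  cases v with
  | nil =>
    simp [pvFinishA]
  | cons x xs =>
    have hlt : (u.length : Int) + 1 < ((u ++ "SCP" :: x :: xs).length : Int) := by
      simp only [List.length_append, List.length_cons]; push_cast; omega
    have hget : PySem.List.pyGet? (u ++ "SCP" :: x :: xs) ((u.length : Int) + 1)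
        = some x := by
      rw [show (u.length : Int) + 1 = ((u.length + 1 : Nat) : Int) by push_cast; ring,
        PySem.List.pyGet?_natCast]
      simp
    simp [hget, pvFinishA]

-- the crash-fix claim; @[simp] registers the proved Prop as a fact usable by simp
@[simp] theorem extract_scp_number_py_raises : Claim_raises_extract_scp_number_py := by
  unfold Claim_raises_extract_scp_number_py
  exact ⟨fun wl _ h hp => h hp, by decide⟩
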